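-- pv_equiv track=rewrite | github.com/cezateknik/Czmtk | CezaMatik/ui/calculator_widget.py | get_current_number_token
-- ===== SOURCE A (Python) =====
-- def get_current_number_token(text):
--     token = ""
--     for char in reversed(text):
--         if char.isdigit() or char in ".,":  # current numeric token
--             token = char + token
--         else:
--             break
--     return token
-- ===== SOURCE B (Python) =====
-- def get_current_number_token(text):
--     # One forward pass maintaining the boundary index of the trailing numeric token.
--     start = 0
--     for i, char in enumerate(text):
--         if not (char.isdigit() or char in ".,"):
--             start = i + 1
--     return text[start:]
-- ===== Notes on version B (the rewrite author's own statement) =====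
-- stated objective: alternative
-- what changed: Replaces the backward early-break scan that prepends characters with a single forward pass that maintains the boundary index of the trailing numeric run and returns one slice.
import Mathlib
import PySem

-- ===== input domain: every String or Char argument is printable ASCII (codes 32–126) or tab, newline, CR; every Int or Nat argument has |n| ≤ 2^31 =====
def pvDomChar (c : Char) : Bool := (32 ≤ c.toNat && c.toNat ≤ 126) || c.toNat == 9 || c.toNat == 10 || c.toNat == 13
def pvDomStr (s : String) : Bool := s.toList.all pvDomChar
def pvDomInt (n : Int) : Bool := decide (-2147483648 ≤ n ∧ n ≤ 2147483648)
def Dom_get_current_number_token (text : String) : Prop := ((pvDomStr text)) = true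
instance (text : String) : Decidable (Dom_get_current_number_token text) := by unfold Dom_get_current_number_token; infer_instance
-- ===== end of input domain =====

-- B replaces A's backward early-break scan (prepending chars) with one forward pass
-- that maintains the boundary index of the trailing numeric run and returns one slice.

-- char.isdigit() or char in ".,"
def pvNumChar (c : Char) : Bool := PySem.Chars.isdigit c || c == '.' || c == ','

-- ===== PORT A =====
-- for char in reversed(text): prepend while numeric, else break
def pvALoop : List Char → List Char → List Char
  | [], token => token
  | c :: rest, token => if pvNumChar c then pvALoop rest (c :: token) else token

def get_current_number_token (text : String) : String :=
  String.mk (pvALoop text.toList.reverse [])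

-- ===== PORT B =====
-- for i, char in enumerate(text): if not numeric, start = i + 1
def pvBLoop : List Char → Nat → Nat → Nat
  | [], _, start => start
  | c :: rest, i, start => pvBLoop rest (i + 1) (if pvNumChar c then start else i + 1)

def get_current_number_token_alt (text : String) : String :=
  String.mk (text.toList.drop (pvBLoop text.toList 0 0))

-- ===== PRECONDITION & SPEC =====
def Spec_get_current_number_token (text : String) (out : String) : Prop := out = get_current_number_token_alt text
instance (text : String) (out : String) : Decidable (Spec_get_current_number_token text out) := by unfold Spec_get_current_number_token; infer_instance

-- ===== CLAIM (what is proved, stated in full; the proofs are below) =====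
def Claim_equal_get_current_number_token : Prop := ∀ (text : String), Dom_get_current_number_token text → Spec_get_current_number_token text (get_current_number_token text)

-- ===== LEMMAS AND PROOFS =====

theorem pvALoop_eq (l acc : List Char) :
    pvALoop l acc = (l.takeWhile pvNumChar).reverse ++ acc := by
  induction l generalizing acc with
  | nil => simp [pvALoop]
  | cons c rest ih =>
    by_cases h : pvNumChar c = true <;>
      simp [pvALoop, List.takeWhile, h, ih]

theorem pvBLoop_snoc (xs : List Char) (c : Char) (i s : Nat) :
    pvBLoop (xs ++ [c]) i s =
      if pvNumChar c then pvBLoop xs i s else i + xs.length + 1 := by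
  induction xs generalizing i s with
  | nil => by_cases h : pvNumChar c = true <;> simp [pvBLoop, h]
  | cons x rest ih =>
    by_cases h : pvNumChar c = true <;>
      simp [pvBLoop, ih, h] <;> omega

theorem pvBLoop_le (l : List Char) (i s : Nat) (hs : s ≤ i) :
    pvBLoop l i s ≤ i + l.length := by
  induction l generalizing i s with
  | nil => simpa [pvBLoop] using hs
  | cons c rest ih =>
    simp only [pvBLoop]
    by_cases h : pvNumChar c = true <;> simp [h]
    · have := ih (i + 1) s (by omega); simp at this ⊢; omega
    · have := ih (i + 1) (i + 1) (le_refl _); simp at this ⊢; omega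

theorem pvMain (l : List Char) :
    l.drop (pvBLoop l 0 0) = (l.reverse.takeWhile pvNumChar).reverse := by
  induction l using List.reverseRecOn with
  | nil => simp [pvBLoop]
  | append_singleton xs c ih =>
    rw [pvBLoop_snoc]
    by_cases h : pvNumChar c = true
    · have hle : pvBLoop xs 0 0 ≤ xs.length := by simpa using pvBLoop_le xs 0 0 (le_refl _)
      simp [h, List.drop_append_of_le_length hle, ih]
    · rw [if_neg h]
      have h1 : (xs ++ [c]).reverse = c :: xs.reverse := by simp
      rw [h1, List.takeWhile_cons_of_neg h, List.reverse_nil]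
      exact List.drop_eq_nil_iff.mpr (by simp)

-- ===== VERDICT (by name: the statement is the Claim_ definition above) =====
theorem get_current_number_token_spec : Claim_equal_get_current_number_token := by
  intro text _
  unfold Spec_get_current_number_token get_current_number_token get_current_number_token_alt
  rw [pvMain, pvALoop_eq]
  simp
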